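-- pv_equiv track=rewrite | github.com/Anh39/Code-Completion-Prompt-Optimize | eval/eval-performance.py | _split_k_parts
-- ===== SOURCE A (Python) =====
-- def _split_k_parts(text: str, k: int) -> list[str]:
--     n = len(text)
--     base = n // k
--     extra = n % k
--     parts = []
--     start = 0
--     for i in range(k):
--         size = base + (1 if i < extra else 0)
--         parts.append(text[start:start+size])
--         start += size
--     return parts
-- ===== SOURCE B (Python) =====
-- def _split_k_parts(text: str, k: int) -> list[str]:
--     base, extra = divmod(len(text), k)
--     sizes = [base + 1] * extra + [base] * (k - extra)
--     it = iter(text)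
--     return [''.join(next(it) for _ in range(size)) for size in sizes]
-- ===== Notes on version B (the rewrite author's own statement) =====
-- stated objective: alternative
-- what changed: Instead of A's stateful loop slicing the string at a running start index, B materialises the part-size list by list replication ([base+1]*extra + [base]*(k-extra)) and streams the characters through a shared iterator, each part joining the next `size` characters; no index arithmetic or slicing remains.
import Mathlib
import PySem

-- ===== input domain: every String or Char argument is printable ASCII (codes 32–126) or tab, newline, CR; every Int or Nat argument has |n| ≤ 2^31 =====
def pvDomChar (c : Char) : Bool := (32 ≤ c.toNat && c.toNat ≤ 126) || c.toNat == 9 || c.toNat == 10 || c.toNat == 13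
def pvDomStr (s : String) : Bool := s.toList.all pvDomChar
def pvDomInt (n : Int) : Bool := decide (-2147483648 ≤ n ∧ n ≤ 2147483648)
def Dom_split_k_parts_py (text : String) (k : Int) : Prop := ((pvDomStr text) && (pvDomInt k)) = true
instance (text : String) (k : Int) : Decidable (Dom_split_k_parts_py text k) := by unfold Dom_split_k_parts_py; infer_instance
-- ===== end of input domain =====

-- B drops A's running-start slicing loop entirely: it materialises the part-size list by
-- replication ([base+1]*extra + [base]*(k-extra)) and streams the characters of the text
-- through it, each part consuming its size from the shared iterator (objective: alternative).


-- ===== PORT A =====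
def split_k_parts_py (text : String) (k : Int) : List String :=
  let n : Int := PySem.Str.len text
  let base := PySem.Int.floordiv n k
  let extra := PySem.Int.mod n k
  let st := (PySem.List.pyRange 0 k 1).foldl
    (fun (st : List String × Int) i =>
      let size := base + (if i < extra then (1 : Int) else 0)
      (st.1 ++ [PySem.Str.slice text (some st.2) (some (st.2 + size))], st.2 + size))
    ([], 0)
  st.1

-- ===== PORT B =====
def split_k_parts_py_alt (text : String) (k : Int) : List String :=
  let base := PySem.Int.floordiv (PySem.Str.len text) k
  let extra := PySem.Int.mod (PySem.Str.len text) k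
  -- Python's [x] * m (m : int) is exactly List.replicate m.toNat x (empty for m ≤ 0)
  let sizes := List.replicate extra.toNat (base + 1) ++ List.replicate (k - extra).toNat base
  -- the shared iterator over text is the list of not-yet-consumed characters;
  -- ''.join(next(it) for _ in range(size)) takes the next `size` of them (size ≥ 0 whenever sizes ≠ [])
  (sizes.foldl
    (fun (st : List String × List Char) size =>
      (st.1 ++ [String.ofList (st.2.take size.toNat)], st.2.drop size.toNat))
    ([], text.toList)).1

-- ===== PRECONDITION & SPEC =====
-- Pre_ excludes exactly k = 0, where Python A raises ZeroDivisionError (n // k); B raises there too.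
def Pre_split_k_parts_py (text : String) (k : Int) : Prop := k ≠ 0
instance (text : String) (k : Int) : Decidable (Pre_split_k_parts_py text k) := by unfold Pre_split_k_parts_py; infer_instance
def pvWitness_split_k_parts_py : String × Int := ("hello", 2)

def Spec_split_k_parts_py (text : String) (k : Int) (out : List String) : Prop := out = split_k_parts_py_alt text k
instance (text : String) (k : Int) (out : List String) : Decidable (Spec_split_k_parts_py text k out) := by unfold Spec_split_k_parts_py; infer_instance

-- ===== CLAIM (what is proved, stated in full; the proofs are below) =====
def Claim_equal_split_k_parts_py : Prop := ∀ (text : String) (k : Int), Dom_split_k_parts_py text k → Pre_split_k_parts_py text k → Spec_split_k_parts_py text k (split_k_parts_py text k)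

-- ===== LEMMAS AND PROOFS =====

-- A's per-index size (base + [i < extra]) over range m is the replicated size list B builds.
theorem map_ite_range (x y : Int) : ∀ (m e : Nat), e ≤ m →
    (List.range m).map (fun (i : Nat) => if (i : Int) < (e : Int) then x else y)
      = List.replicate e x ++ List.replicate (m - e) y := by
  intro m
  induction m with
  | zero => intro e he; interval_cases e; simp
  | succ m ih =>
    intro e he
    rw [List.range_succ, List.map_append]
    rcases Nat.lt_or_ge e (m + 1) with h | h
    · have he' : e ≤ m := by omega
      rw [ih e he']
      have hm : ¬ ((m : Int) < (e : Int)) := by omega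
      simp only [List.map_cons, List.map_nil, if_neg hm]
      have hms : m + 1 - e = (m - e) + 1 := by omega
      rw [hms, List.replicate_succ', List.append_assoc]
    · have he' : e = m + 1 := by omega
      subst he'
      have hx : ((List.range m).map
            (fun (i : Nat) => if (i : Int) < ((m + 1 : Nat) : Int) then x else y))
          = List.replicate m x := by
        have hall : ∀ i ∈ List.range m,
            (if (i : Int) < ((m + 1 : Nat) : Int) then x else y) = x := by
          intro i hi
          have := List.mem_range.mp hi
          rw [if_pos (by push_cast; omega)]
        rw [List.map_congr_left hall, List.map_const', List.length_range]
      rw [hx]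
      simp [List.replicate_succ']

-- A's slice-by-running-start fold equals B's take/drop fold, for nonnegative sizes,
-- starting at offset `off` into the text.
theorem fold_slice_eq_fold_take (text : String) :
    ∀ (sizes : List Int), (∀ s ∈ sizes, 0 ≤ s) → ∀ (acc : List String) (off : Nat),
    (sizes.foldl
      (fun (st : List String × Int) size =>
        (st.1 ++ [PySem.Str.slice text (some st.2) (some (st.2 + size))], st.2 + size))
      (acc, (off : Int))).1
    = (sizes.foldl
      (fun (st : List String × List Char) size =>
        (st.1 ++ [String.ofList (st.2.take size.toNat)], st.2.drop size.toNat))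
      (acc, text.toList.drop off)).1 := by
  intro sizes
  induction sizes with
  | nil => intro _ acc off; simp
  | cons s ss ih =>
    intro h acc off
    have hs : 0 ≤ s := h s List.mem_cons_self
    simp only [List.foldl_cons]
    have hcast : (off : Int) + s = ((off + s.toNat : Nat) : Int) := by omega
    have hslice : PySem.Str.slice text (some (off : Int)) (some ((off : Int) + s))
        = String.ofList ((text.toList.drop off).take s.toNat) := by
      have h0 : PySem.Str.slice text (some (off : Int)) (some ((off : Int) + s))
          = String.ofList (PySem.Str.slice text (some (off : Int))
              (some ((off : Int) + s))).toList := (String.ofList_toList).symm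
      rw [h0]
      congr 1
      simp only [pysem]
      rw [show ((off : Int) + s) = ((off : Int) + (s.toNat : Int)) by omega,
        PySem.List.slice_natCast_add]
    have hdl : (text.toList.drop off).drop s.toNat = text.toList.drop (off + s.toNat) := by
      rw [List.drop_drop]
    rw [hslice, hcast, hdl]
    exact ih (fun t ht => h t (List.mem_cons_of_mem _ ht)) _ (off + s.toNat)

theorem split_k_parts_py_eq (text : String) (k : Int) (hk : k ≠ 0) :
    split_k_parts_py text k = split_k_parts_py_alt text k := by
  unfold split_k_parts_py split_k_parts_py_alt
  dsimp only
  set n : Int := PySem.Str.len text with hn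
  have hn0 : 0 ≤ n := by simp [hn, PySem.Str.len_eq]
  set base := PySem.Int.floordiv n k with hb
  set extra := PySem.Int.mod n k with he
  rcases lt_or_ge k 0 with hneg | hpos
  · -- k < 0: A's range is empty; B's size list is empty (both replication counts ≤ 0)
    have hbounds := PySem.Int.mod_neg_bounds (a := n) (b := k) hneg
    have h1 : extra.toNat = 0 := by omega
    have h2 : (k - extra).toNat = 0 := by omega
    rw [PySem.List.pyRange_one_eq_nil (by omega : k ≤ (0 : Int)), h1, h2]
    simp
  · have hkpos : 0 < k := lt_of_le_of_ne hpos (Ne.symm hk)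
    have hx0 : 0 ≤ extra := PySem.Int.mod_nonneg n hkpos
    have hxk : extra < k := PySem.Int.mod_lt n hkpos
    have hbase : 0 ≤ base := by
      rw [hb, PySem.Int.floordiv_eq_ediv_of_pos hkpos]
      exact Int.ediv_nonneg hn0 (le_of_lt hkpos)
    have hrange : PySem.List.pyRange 0 k 1
        = (List.range k.toNat).map (fun (j : Nat) => (j : Int)) := by
      rw [PySem.List.pyRange_one]
      simp only [sub_zero, zero_add]
    have hsizes : (List.range k.toNat).map
          (fun (i : Nat) => base + (if (i : Int) < extra then (1 : Int) else 0))
        = List.replicate extra.toNat (base + 1) ++ List.replicate (k - extra).toNat base := by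
      calc (List.range k.toNat).map
              (fun (i : Nat) => base + (if (i : Int) < extra then (1 : Int) else 0))
          = (List.range k.toNat).map
              (fun (i : Nat) => if (i : Int) < (extra.toNat : Int) then base + 1 else base) := by
            apply List.map_congr_left; intro i _
            by_cases hlt : (i : Int) < extra
            · rw [if_pos hlt, if_pos (by omega)]
            · rw [if_neg hlt, if_neg (by omega), add_zero]
        _ = List.replicate extra.toNat (base + 1)
              ++ List.replicate (k.toNat - extra.toNat) base :=
            map_ite_range _ _ k.toNat extra.toNat (by omega)
        _ = List.replicate extra.toNat (base + 1) ++ List.replicate (k - extra).toNat base := by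
            congr 2; omega
    have hA : (PySem.List.pyRange 0 k 1).foldl
          (fun (st : List String × Int) i =>
            (st.1 ++ [PySem.Str.slice text (some st.2)
                (some (st.2 + (base + (if i < extra then (1 : Int) else 0))))],
             st.2 + (base + (if i < extra then (1 : Int) else 0))))
          ([], 0)
        = (List.replicate extra.toNat (base + 1)
            ++ List.replicate (k - extra).toNat base).foldl
          (fun (st : List String × Int) size =>
            (st.1 ++ [PySem.Str.slice text (some st.2) (some (st.2 + size))], st.2 + size))
          ([], 0) := by
      calc (PySem.List.pyRange 0 k 1).foldl
              (fun (st : List String × Int) i =>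
                (st.1 ++ [PySem.Str.slice text (some st.2)
                    (some (st.2 + (base + (if i < extra then (1 : Int) else 0))))],
                 st.2 + (base + (if i < extra then (1 : Int) else 0))))
              ([], 0)
          = ((PySem.List.pyRange 0 k 1).map
                (fun (i : Int) => base + (if i < extra then (1 : Int) else 0))).foldl
              (fun (st : List String × Int) size =>
                (st.1 ++ [PySem.Str.slice text (some st.2) (some (st.2 + size))], st.2 + size))
              ([], 0) := by rw [List.foldl_map]
        _ = (((List.range k.toNat).map (fun (j : Nat) => (j : Int))).map
                (fun (i : Int) => base + (if i < extra then (1 : Int) else 0))).foldl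
              (fun (st : List String × Int) size =>
                (st.1 ++ [PySem.Str.slice text (some st.2) (some (st.2 + size))], st.2 + size))
              ([], 0) := by rw [hrange]
        _ = ((List.range k.toNat).map
                (fun (i : Nat) => base + (if (i : Int) < extra then (1 : Int) else 0))).foldl
              (fun (st : List String × Int) size =>
                (st.1 ++ [PySem.Str.slice text (some st.2) (some (st.2 + size))], st.2 + size))
              ([], 0) := by rw [List.map_map]; rfl
        _ = (List.replicate extra.toNat (base + 1)
                ++ List.replicate (k - extra).toNat base).foldl
              (fun (st : List String × Int) size =>
                (st.1 ++ [PySem.Str.slice text (some st.2) (some (st.2 + size))], st.2 + size))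
              ([], 0) := by rw [hsizes]
    rw [hA]
    have hfold := fold_slice_eq_fold_take text
      (List.replicate extra.toNat (base + 1) ++ List.replicate (k - extra).toNat base)
      (by
        intro s hs
        rcases List.mem_append.mp hs with h | h
        · rw [List.eq_of_mem_replicate h]; omega
        · rw [List.eq_of_mem_replicate h]; omega)
      [] 0
    simpa using hfold

-- ===== VERDICT (by name: the statement is the Claim_ definition above) =====
theorem split_k_parts_py_spec : Claim_equal_split_k_parts_py := by
  intro text k _ hk
  exact split_k_parts_py_eq text k hk
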